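-- pv_equiv track=rewrite | github.com/sdraeger/DDALAB | packages/dda-py/src/dda_py/generated/variants.py | generate_select_mask
-- ===== SOURCE A (Python) =====
-- from typing import Optional, List
--
-- class SelectMaskPositions:
--     """SELECT mask bit positions
--
--     The SELECT mask is a 6-element list controlling which variants to execute.
--     Format: ST CT CD RESERVED DE SY
--     """
--     CD = 2
--     CT = 1
--     DE = 4  # Position 3 is RESERVED
--     ST = 0
--     SY = 5
--     RESERVED = 3
--
-- def generate_select_mask(variants: List[str]) -> List[int]:
--     """Generate SELECT mask from enabled variants
--
--     Args:
--         variants: List of variant abbreviations to enable (e.g., ["ST", "CT"])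
--
--     Returns:
--         6-element list with 1s for enabled variants, 0s for disabled
--
--     Example:
--         >>> mask = generate_select_mask(["ST", "SY"])
--         >>> assert mask == [1, 0, 0, 0, 0, 1]  # ST and SY enabled
--     """
--     mask = [0, 0, 0, 0, 0, 0]
--
--     for variant in variants:
--         if variant == "CD":
--             mask[SelectMaskPositions.CD] = 1
--         if variant == "CT":
--             mask[SelectMaskPositions.CT] = 1
--         if variant == "DE":
--             mask[SelectMaskPositions.DE] = 1
--         if variant == "ST":
--             mask[SelectMaskPositions.ST] = 1
--         if variant == "SY":
--             mask[SelectMaskPositions.SY] = 1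
--
--     return mask
-- ===== SOURCE B (Python) =====
-- from typing import Optional, List
--
-- POSITION_NAMES = ["ST", "CT", "CD", None, "DE", "SY"]
--
-- def generate_select_mask(variants: List[str]) -> List[int]:
--     """Generate SELECT mask from enabled variants (position-driven membership test)."""
--     return [1 if name is not None and name in variants else 0 for name in POSITION_NAMES]
-- ===== Notes on version B (the rewrite author's own statement) =====
-- stated objective: simpler
-- what changed: Instead of scanning the input and setting bits via five equality checks per element, B iterates over the fixed ordered list of position names (None at the RESERVED slot) and tests membership of each name in the input.
import Mathlib
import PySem

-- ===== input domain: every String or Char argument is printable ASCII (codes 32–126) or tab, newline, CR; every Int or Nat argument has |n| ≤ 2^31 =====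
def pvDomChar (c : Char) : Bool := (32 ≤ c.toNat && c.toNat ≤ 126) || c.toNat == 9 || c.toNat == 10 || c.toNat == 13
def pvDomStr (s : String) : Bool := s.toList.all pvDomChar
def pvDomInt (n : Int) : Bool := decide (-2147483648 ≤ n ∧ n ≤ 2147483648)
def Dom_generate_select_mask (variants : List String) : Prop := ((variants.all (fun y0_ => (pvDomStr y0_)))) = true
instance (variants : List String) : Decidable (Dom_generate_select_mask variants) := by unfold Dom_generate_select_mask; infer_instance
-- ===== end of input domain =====

-- ===== PORT A =====
-- B builds the mask by membership of each fixed position name instead of scanning the input; simpler decomposition, same cost.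
-- mutable list `mask` with the five sequential ifs, folded over `variants`
def gsmStep (mask : List Int) (variant : String) : List Int :=
  let mask := if variant = "CD" then mask.set 2 1 else mask
  let mask := if variant = "CT" then mask.set 1 1 else mask
  let mask := if variant = "DE" then mask.set 4 1 else mask
  let mask := if variant = "ST" then mask.set 0 1 else mask
  if variant = "SY" then mask.set 5 1 else mask

def generate_select_mask (variants : List String) : List Int :=
  variants.foldl gsmStep [0, 0, 0, 0, 0, 0]

-- ===== PORT B =====
def POSITION_NAMES : List (Option String) :=
  [some "ST", some "CT", some "CD", none, some "DE", some "SY"]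

def generate_select_mask_alt (variants : List String) : List Int :=
  POSITION_NAMES.map (fun name =>
    match name with
    | some s => if variants.contains s then 1 else 0
    | none => 0)

-- ===== PRECONDITION & SPEC =====
def Spec_generate_select_mask (variants : List String) (out : List Int) : Prop := out = generate_select_mask_alt variants
instance (variants : List String) (out : List Int) : Decidable (Spec_generate_select_mask variants out) := by unfold Spec_generate_select_mask; infer_instance

-- ===== CLAIM (what is proved, stated in full; the proofs are below) =====
def Claim_equal_generate_select_mask : Prop := ∀ (variants : List String), Dom_generate_select_mask variants → Spec_generate_select_mask variants (generate_select_mask variants)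

-- ===== LEMMAS AND PROOFS =====

lemma contains_append_singleton (vs : List String) (v s : String) :
    (vs ++ [v]).contains s = (vs.contains s || v == s) := by
  simp [Eq.comm]
  by_cases h : v = s <;> simp [h]

lemma alt_append (vs : List String) (v : String) :
    generate_select_mask_alt (vs ++ [v]) = gsmStep (generate_select_mask_alt vs) v := by
  simp only [generate_select_mask_alt, POSITION_NAMES, List.map,
    contains_append_singleton]
  by_cases h1 : v = "CD" <;> by_cases h2 : v = "CT" <;> by_cases h3 : v = "DE" <;>
    by_cases h4 : v = "ST" <;> by_cases h5 : v = "SY" <;>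
    simp_all [gsmStep, List.set]

lemma gsm_eq_alt (variants : List String) :
    generate_select_mask variants = generate_select_mask_alt variants := by
  induction variants using List.reverseRecOn with
  | nil => rfl
  | append_singleton vs v ih =>
    simp only [generate_select_mask, List.foldl_append, List.foldl_cons, List.foldl_nil]
    rw [show vs.foldl gsmStep [0, 0, 0, 0, 0, 0] = generate_select_mask vs from rfl, ih,
      alt_append]

-- ===== VERDICT (by name: the statement is the Claim_ definition above) =====
theorem generate_select_mask_spec : Claim_equal_generate_select_mask := by
  intro variants _
  exact gsm_eq_alt variants
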